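-- pv_equiv track=rewrite | github.com/t0ddb/alpha-scanner | audit_sequence_v2_regime.py | first_two_distinct_types
-- ===== SOURCE A (Python) =====
-- def first_two_distinct_types(types):
--     seen = []
--     for t in types:
--         if not seen or seen[-1] != t:
--             seen.append(t)
--         if len(seen) == 2:
--             break
--     return tuple(seen)
-- ===== SOURCE B (Python) =====
-- def first_two_distinct_types(types):
--     keys = []
--     i, n = 0, len(types)
--     while i < n and len(keys) < 2:
--         k = types[i]
--         keys.append(k)
--         while i < n and types[i] == k:
--             i += 1
--     return tuple(keys)
-- ===== Notes on version B (the rewrite author's own statement) =====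
-- stated objective: alternative
-- what changed: B treats the sequence as runs: it takes a run's key and skips the whole run with an inner scan, repeating at most twice, instead of A's per-element compare-with-last-of-seen loop with a break.
import Mathlib
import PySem

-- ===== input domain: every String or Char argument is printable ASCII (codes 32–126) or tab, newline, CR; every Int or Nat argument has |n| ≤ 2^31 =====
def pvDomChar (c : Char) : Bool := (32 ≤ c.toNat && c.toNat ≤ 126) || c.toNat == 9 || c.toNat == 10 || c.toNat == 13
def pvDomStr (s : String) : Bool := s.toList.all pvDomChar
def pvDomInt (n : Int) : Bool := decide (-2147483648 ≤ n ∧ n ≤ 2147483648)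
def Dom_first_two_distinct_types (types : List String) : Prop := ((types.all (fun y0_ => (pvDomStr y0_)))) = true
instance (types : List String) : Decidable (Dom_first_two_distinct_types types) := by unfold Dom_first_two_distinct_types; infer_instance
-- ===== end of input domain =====

-- B collapses the sequence into runs (take a run key, skip the run) instead of A's
-- per-element compare-with-last loop; same values, alternative decomposition.

-- ===== PORT A =====
-- loop state: seen; break when len(seen) == 2
def ftdGoA (seen : List String) (types : List String) : List String :=
  match types with
  | [] => seen
  | t :: ts =>
    let seen' := if seen.isEmpty || seen.getLast? ≠ some t then seen ++ [t] else seen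
    if seen'.length = 2 then seen' else ftdGoA seen' ts

def first_two_distinct_types (types : List String) : List String :=
  ftdGoA [] types

-- ===== PORT B =====
-- outer while: while any input left and fewer than 2 keys, take the key and skip its run
def ftdRuns (fuel : Nat) (types : List String) : List String :=
  match fuel, types with
  | 0, _ => []
  | _, [] => []
  | Nat.succ n, t :: ts => t :: ftdRuns n (ts.dropWhile (· = t))

def first_two_distinct_types_alt (types : List String) : List String :=
  ftdRuns 2 types

-- ===== PRECONDITION & SPEC =====
def Spec_first_two_distinct_types (types : List String) (out : List String) : Prop := out = first_two_distinct_types_alt types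
instance (types : List String) (out : List String) : Decidable (Spec_first_two_distinct_types types out) := by unfold Spec_first_two_distinct_types; infer_instance

-- ===== CLAIM (what is proved, stated in full; the proofs are below) =====
def Claim_equal_first_two_distinct_types : Prop := ∀ (types : List String), Dom_first_two_distinct_types types → Spec_first_two_distinct_types types (first_two_distinct_types types)

-- ===== LEMMAS AND PROOFS =====
-- With one element seen, A's loop returns [a] plus at most one key of the remainder
-- after the run of a is skipped.
theorem ftdGoA_one (a : String) (ts : List String) :
    ftdGoA [a] ts = a :: ftdRuns 1 (ts.dropWhile (· = a)) := by
  induction ts with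
  | nil => rfl
  | cons t ts ih =>
    by_cases h : a = t
    · subst h
      simpa [ftdGoA, List.dropWhile] using ih
    · simp [ftdGoA, List.dropWhile, h, Ne.symm h, ftdRuns]

theorem ftdGoA_nil (ts : List String) : ftdGoA [] ts = ftdRuns 2 ts := by
  cases ts with
  | nil => rfl
  | cons t ts => simp [ftdGoA, ftdRuns, ftdGoA_one]

-- ===== VERDICT (by name: the statement is the Claim_ definition above) =====
theorem first_two_distinct_types_spec : Claim_equal_first_two_distinct_types := by
  intro types _
  unfold Spec_first_two_distinct_types first_two_distinct_types first_two_distinct_types_alt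
  exact ftdGoA_nil types
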